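-- pv_equiv track=rewrite | github.com/ursomniac/skytour | skytour/data/wds/test_dbl.py | find_dupe_coords
-- ===== SOURCE A (Python) =====
-- def get_coords(s):
--     return s[:10]
--
-- def find_dupe_coords(lines):
--     found = []
--     dupes = {}
--     for line in lines:
--         c = get_coords(line)
--         if c in found:
--             if c not in dupes.keys():
--                 dupes[c] = 2
--             else:
--                 dupes[c] += 1
--         else:
--             found.append(c)
--     return dupes
-- ===== SOURCE B (Python) =====
-- def get_coords(s):
--     return s[:10]
--
-- def find_dupe_coords(lines):
--     coords = [get_coords(line) for line in lines]
--     return {c: coords.count(c)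
--             for i, c in enumerate(coords)
--             if coords[:i].count(c) == 1}
-- ===== Notes on version B (the rewrite author's own statement) =====
-- stated objective: simpler
-- what changed: Replaces A's mutable found-list/dupes-dict incremental bookkeeping with a single dict comprehension that emits each coordinate prefix at its second occurrence with its whole-list count.
import Mathlib
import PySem

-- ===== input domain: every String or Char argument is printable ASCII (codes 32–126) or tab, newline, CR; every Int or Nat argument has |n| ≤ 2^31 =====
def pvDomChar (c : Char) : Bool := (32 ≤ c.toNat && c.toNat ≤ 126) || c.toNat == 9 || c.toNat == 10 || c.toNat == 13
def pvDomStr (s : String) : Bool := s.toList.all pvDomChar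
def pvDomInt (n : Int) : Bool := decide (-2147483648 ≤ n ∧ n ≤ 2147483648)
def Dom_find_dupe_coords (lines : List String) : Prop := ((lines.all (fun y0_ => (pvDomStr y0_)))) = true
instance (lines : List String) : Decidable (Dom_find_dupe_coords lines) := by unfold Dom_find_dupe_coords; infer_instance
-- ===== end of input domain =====

-- B replaces A's incremental found-list/dupes-dict bookkeeping with one comprehension that emits each
-- coordinate prefix at its second occurrence, valued by its whole-list count (simpler; same cost).

-- ===== PORT A =====
def get_coords (s : String) : String := PySem.Str.slice s none (some 10)

-- A's loop body: state = (found, dupes)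
def stepA (st : List String × PySem.Dict String Int) (c : String) :
    List String × PySem.Dict String Int :=
  if c ∈ st.1 then
    if !(st.2.contains c) then (st.1, st.2.insert c 2)
    else (st.1, st.2.modify c 0 (· + 1))
  else (st.1 ++ [c], st.2)

def find_dupe_coords (lines : List String) : List (String × Int) :=
  (lines.foldl (fun st line => stepA st (get_coords line))
    ([], PySem.Dict.empty)).2.items

-- ===== PORT B =====
def find_dupe_coords_alt (lines : List String) : List (String × Int) :=
  let coords := lines.map get_coords
  ((PySem.List.enumerate coords).foldl
    (fun (d : PySem.Dict String Int) q =>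
      if (PySem.List.slice coords none (some q.1)).count q.2 == 1
      then d.insert q.2 ((coords.count q.2 : Int)) else d)
    PySem.Dict.empty).items

-- ===== PRECONDITION & SPEC =====
def Spec_find_dupe_coords (lines : List String) (out : List (String × Int)) : Prop := out = find_dupe_coords_alt lines
instance (lines : List String) (out : List (String × Int)) : Decidable (Spec_find_dupe_coords lines out) := by unfold Spec_find_dupe_coords; infer_instance

-- ===== CLAIM (what is proved, stated in full; the proofs are below) =====
def Claim_equal_find_dupe_coords : Prop := ∀ (lines : List String), Dom_find_dupe_coords lines → Spec_find_dupe_coords lines (find_dupe_coords lines)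

-- ===== LEMMAS AND PROOFS =====

-- the test of B's comprehension
def pB (w : List String) (q : Int × String) : Bool :=
  (PySem.List.slice w none (some q.1)).count q.2 == 1

-- the keys B emits: the elements of w standing at their second occurrence, in order
def so (w : List String) : List String :=
  ((PySem.List.enumerate w).filter (pB w)).map (·.2)

lemma pB_front (cs : List String) (c : String) (q : Int × String)
    (hq : q ∈ PySem.List.enumerate cs 0) : pB (cs ++ [c]) q = pB cs q := by
  rw [PySem.List.mem_enumerate_iff] at hq
  obtain ⟨k, hk, rfl⟩ := hq
  simp only [pB, zero_add, PySem.List.slice_to_natCast,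
    List.take_append_of_le_length (le_of_lt hk)]

lemma so_append (cs : List String) (c : String) :
    so (cs ++ [c]) = if cs.count c = 1 then so cs ++ [c] else so cs := by
  have hlast : pB (cs ++ [c]) ((cs.length : Int), c) = (cs.count c == 1) := by
    simp only [pB, PySem.List.slice_to_natCast, List.take_left]
  simp only [so, PySem.List.enumerate_append, List.filter_append, List.map_append]
  rw [List.filter_congr (fun q hq => pB_front cs c q hq)]
  have : PySem.List.enumerate [c] ((0:Int) + (cs.length : Int)) = [((0:Int) + (cs.length:Int), c)] := by
    simp [PySem.List.enumerate_cons, PySem.List.enumerate_nil]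
  rw [this]
  simp only [zero_add, List.filter, hlast]
  by_cases h : cs.count c = 1
  · rw [show (List.count c cs == 1) = true from by simp [h]]
    simp [h]
  · rw [show (List.count c cs == 1) = false from by simp [h]]
    simp [h]

lemma mem_so_iff (cs : List String) (v : String) : v ∈ so cs ↔ 2 ≤ cs.count v := by
  induction cs using List.reverseRecOn with
  | nil => simp [so, PySem.List.enumerate_nil]
  | append_singleton cs c ih =>
    rw [so_append]
    by_cases h : cs.count c = 1
    · simp only [h, if_true, List.mem_append, List.mem_singleton, ih, List.count_append]
      by_cases hv : v = c
      · subst hv; simp [h]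
      · simp [hv, Ne.symm hv]
    · simp only [h, if_false, ih, List.count_append]
      by_cases hv : v = c
      · subst hv
        simp only [List.count_singleton, beq_self_eq_true, if_true]
        omega
      · simp [Ne.symm hv]

lemma nodup_so (cs : List String) : (so cs).Nodup := by
  induction cs using List.reverseRecOn with
  | nil => simp [so, PySem.List.enumerate_nil]
  | append_singleton cs c ih =>
    rw [so_append]
    split_ifs with h
    · refine List.Nodup.append ih (List.nodup_singleton c) ?_
      intro x hx hx'
      rw [List.mem_singleton] at hx'
      subst hx'
      have := (mem_so_iff cs x).1 hx
      omega
    · exact ih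

-- B's fold over distinct fresh keys appends its emitted pairs
lemma foldl_insert_if_items (w : List String) :
    ∀ (l : List (Int × String)) (d : PySem.Dict String Int),
      ((l.filter (pB w)).map (·.2)).Nodup →
      (∀ q ∈ l.filter (pB w), d.contains q.2 = false) →
      (l.foldl (fun d q => if pB w q then d.insert q.2 ((w.count q.2 : Int)) else d) d).items
        = d.items ++ (l.filter (pB w)).map (fun q => (q.2, (w.count q.2 : Int))) := by
  intro l
  induction l with
  | nil => intro d _ _; simp
  | cons q l ih =>
    intro d hnd hdisj
    by_cases hp : pB w q = true
    · simp only [List.foldl_cons, hp, if_true]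
      rw [List.filter_cons_of_pos hp] at hnd hdisj
      simp only [List.map_cons, List.nodup_cons] at hnd
      rw [List.filter_cons_of_pos hp, List.map_cons]
      have hfresh : d.contains q.2 = false := hdisj q (List.mem_cons_self ..)
      rw [ih (d.insert q.2 ((w.count q.2 : Int))) hnd.2 ?_]
      · rw [PySem.Dict.items_insert_of_not_contains _ _ hfresh]
        simp
      · intro q' hq'
        rw [PySem.Dict.contains_insert]
        have hne : q'.2 ≠ q.2 := by
          intro he
          exact hnd.1 (he ▸ List.mem_map_of_mem hq')
        simp [hne, hdisj q' (List.mem_cons_of_mem _ hq')]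
    · simp only [List.foldl_cons, hp, if_false, Bool.false_eq_true]
      rw [List.filter_cons_of_neg (by simpa using hp)] at hnd hdisj ⊢
      exact ih d hnd hdisj

-- A's loop invariant: found = the ordered dedup, dupes has exactly the second-occurrence keys,
-- each valued by its count in the processed prefix
lemma A_inv (cs : List String) :
    (cs.foldl stepA ([], PySem.Dict.empty)).1 = PySem.Set.ofList cs ∧
    (cs.foldl stepA ([], PySem.Dict.empty)).2.keys = so cs ∧
    ∀ v ∈ so cs, (cs.foldl stepA ([], PySem.Dict.empty)).2.getD v 0 = (cs.count v : Int) := by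
  induction cs using List.reverseRecOn with
  | nil =>
    refine ⟨rfl, ?_, ?_⟩
    · simp [so, PySem.List.enumerate_nil, PySem.Dict.keys_empty]
    · intro v hv; simp [so, PySem.List.enumerate_nil] at hv
  | append_singleton cs c ih =>
    obtain ⟨ih1, ih2, ih3⟩ := ih
    rw [List.foldl_append] at *
    simp only [List.foldl_cons, List.foldl_nil]
    by_cases hmem : c ∈ cs
    · have hcmem : c ∈ (cs.foldl stepA ([], PySem.Dict.empty)).1 := by
        rw [ih1, PySem.Set.mem_ofList]; exact hmem
      by_cases hdup : 2 ≤ cs.count c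
      · -- already a dupe key: modify
        have hcon : (cs.foldl stepA ([], PySem.Dict.empty)).2.contains c = true := by
          rw [PySem.Dict.contains_iff_mem_keys, ih2, mem_so_iff]; exact hdup
        have hso : so (cs ++ [c]) = so cs := by
          rw [so_append]; simp [show ¬ cs.count c = 1 by omega]
        rw [stepA, if_pos hcmem, hcon]
        simp only [Bool.not_true, Bool.false_eq_true, if_false]
        refine ⟨ih1.trans ?_, ?_, ?_⟩
        · rw [PySem.Set.ofList_append_singleton, PySem.Set.add_eq_ite,
            if_pos (by rw [PySem.Set.mem_ofList]; exact hmem)]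
        · rw [PySem.Dict.keys_modify, PySem.Dict.keys_insert_of_contains _ _ hcon, ih2, hso]
        · intro v hv
          rw [hso] at hv
          by_cases hvc : v = c
          · subst hvc
            rw [PySem.Dict.getD_modify_self, ih3 v hv, List.count_append]
            simp
          · rw [PySem.Dict.getD_modify_of_ne _ _ _ hvc, ih3 v hv, List.count_append]
            simp [Ne.symm hvc]
      · -- second occurrence: insert with value 2
        have h1 : cs.count c = 1 := by
          have := List.count_pos_iff.2 hmem; omega
        have hcon : (cs.foldl stepA ([], PySem.Dict.empty)).2.contains c = false := by
          rw [← Bool.not_eq_true, PySem.Dict.contains_iff_mem_keys, ih2, mem_so_iff]; omega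
        have hso : so (cs ++ [c]) = so cs ++ [c] := by rw [so_append, if_pos h1]
        rw [stepA, if_pos hcmem, hcon]
        simp only [Bool.not_false, if_true]
        refine ⟨ih1.trans ?_, ?_, ?_⟩
        · rw [PySem.Set.ofList_append_singleton, PySem.Set.add_eq_ite,
            if_pos (by rw [PySem.Set.mem_ofList]; exact hmem)]
        · rw [PySem.Dict.keys_insert_of_not_contains _ _ hcon, ih2, hso]
        · intro v hv
          rw [hso, List.mem_append, List.mem_singleton] at hv
          rcases hv with hv | rfl
          · have hvc : v ≠ c := by
              intro h; subst h
              have := (mem_so_iff cs v).1 hv; omega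
            rw [PySem.Dict.getD_insert_of_ne _ _ _ hvc, ih3 v hv, List.count_append]
            simp [Ne.symm hvc]
          · rw [PySem.Dict.getD_insert_self, List.count_append]
            simp [h1]
    · -- first occurrence: append to found, dict unchanged
      have hcmem : c ∉ (cs.foldl stepA ([], PySem.Dict.empty)).1 := by
        rw [ih1, PySem.Set.mem_ofList]; exact hmem
      have h0 : cs.count c = 0 := List.count_eq_zero.2 hmem
      have hso : so (cs ++ [c]) = so cs := by
        rw [so_append]; simp [show ¬ cs.count c = 1 by omega]
      rw [stepA, if_neg hcmem]
      refine ⟨?_, by rw [ih2, hso], ?_⟩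
      · rw [ih1, PySem.Set.ofList_append_singleton, PySem.Set.add_eq_ite,
          if_neg (by rw [PySem.Set.mem_ofList]; exact hmem)]
      · intro v hv
        rw [hso] at hv
        have hvc : v ≠ c := by
          intro h; subst h
          have := (mem_so_iff cs v).1 hv; omega
        rw [ih3 v hv, List.count_append]
        simp [Ne.symm hvc]

-- ===== VERDICT (by name: the statement is the Claim_ definition above) =====
theorem find_dupe_coords_spec : Claim_equal_find_dupe_coords := by
  intro lines _
  unfold Spec_find_dupe_coords find_dupe_coords find_dupe_coords_alt
  dsimp only
  rw [← List.foldl_map]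
  set cs := lines.map get_coords with hcs
  obtain ⟨-, h2, h3⟩ := A_inv cs
  -- A's items, read off the invariant
  rw [PySem.Dict.items_eq_map_keys _ (h2 ▸ nodup_so cs) 0, h2,
    List.map_congr_left (fun v hv => by rw [h3 v hv])]
  -- B's items, via the fresh-key fold lemma
  rw [show (fun (d : PySem.Dict String Int) (q : Int × String) =>
      if (PySem.List.slice cs none (some q.1)).count q.2 == 1
      then d.insert q.2 ((cs.count q.2 : Int)) else d)
    = (fun d q => if pB cs q then d.insert q.2 ((cs.count q.2 : Int)) else d) from rfl]
  rw [foldl_insert_if_items cs (PySem.List.enumerate cs) PySem.Dict.empty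
    (nodup_so cs) (by intro q _; rfl)]
  rw [show PySem.Dict.empty.items = ([] : List (String × Int)) from rfl, List.nil_append]
  simp only [so, List.map_map]
  rfl
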